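-- pv_equiv track=rewrite | github.com/Gamoventure1175/datastuctures_and_algorithm_questions | randomn problems/boolean_matrix.py | boolean_matrix
-- ===== SOURCE A (Python) =====
-- def boolean_matrix(mat: list[list[int]]):
--     """Takes a matrix of nxn size where each cell contains only boolean values (1, 0)
--     and modifies it such that if a matrix cell [i][j] is 1 then all the cells in its ith row
--     and jth column will become 1"""
--     res = mat.copy()
--     l_rows = len(mat)
--     l_cols = len(mat[0])
--
--     pairs = list()
--
--     for i in range(l_rows):
--         for j in range(l_cols):
--             if mat[i][j] == 1:
--                 pairs.append((i, j))  # O(n^2)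
--
--     for pair in pairs:
--         i, j = pair
--         for k in range(l_cols):
--             res[i][k] = 1
--         for k in range(l_rows):
--             res[k][j] = 1
--
--     return res
-- ===== SOURCE B (Python) =====
-- def boolean_matrix(mat: list[list[int]]):
--     """Classic O(n*m) version: mark the rows and columns that contain a 1,
--     then rebuild -- marked rows become all 1s, the other rows get 1s at the
--     marked columns."""
--     marked = {i for i, row in enumerate(mat) if 1 in row}
--     cols = {j for i in marked for j, x in enumerate(mat[i]) if x == 1}
--     res = []
--     for i, row in enumerate(mat):
--         if i in marked:
--             res.append([1] * len(row))
--         else: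
--             filled = list(row)
--             for j in cols:
--                 filled[j] = 1
--             res.append(filled)
--     return res
-- ===== Notes on version B (the rewrite author's own statement) =====
-- stated objective: alternative
-- what changed: Instead of collecting every 1-cell and rewriting its whole row and column once per such cell, B marks the rows and columns containing a 1 in one pass and rebuilds row by row (marked rows become all 1s, others get 1s at marked columns); Pre_ restricts to non-empty rectangular matrices, the function's stated nxn domain: A raises IndexError on the empty matrix and on ragged inputs with a row shorter than row 0, and on ragged inputs with rows longer than row 0 A's partial scan/fill up to len(mat[0]) is an accident of its implementation.
-- outside the precondition, e.g. on boolean_matrix([[0], [1, 5]]): A returns [[1], [1, 5]], B returns [[1], [1, 1]]; on boolean_matrix([[0, 0], [0, 0, 1]]): A returns [[0, 0], [0, 0, 1]], B raises IndexError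
import Mathlib
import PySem

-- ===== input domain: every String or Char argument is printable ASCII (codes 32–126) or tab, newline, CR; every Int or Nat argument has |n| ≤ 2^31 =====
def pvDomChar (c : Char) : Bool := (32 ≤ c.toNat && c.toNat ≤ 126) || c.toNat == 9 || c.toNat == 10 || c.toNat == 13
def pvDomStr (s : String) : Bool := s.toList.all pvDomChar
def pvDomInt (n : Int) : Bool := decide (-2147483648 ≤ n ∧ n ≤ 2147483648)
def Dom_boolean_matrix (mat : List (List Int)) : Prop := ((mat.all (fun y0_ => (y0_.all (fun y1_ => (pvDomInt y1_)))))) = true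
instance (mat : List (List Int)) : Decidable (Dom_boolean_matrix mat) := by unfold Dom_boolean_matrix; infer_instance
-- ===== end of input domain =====

-- B replaces A's per-1-cell row/column rewriting by one marking pass (the set of rows and the
-- set of columns containing a 1) plus one cell-by-cell rebuild; Python A additionally mutates
-- mat's rows in place, B does not — the claim is about the return value only.

-- ===== PORT A =====
-- `for k in range(l_cols): res[i][k] = 1` — writes in range under Pre_
def pvRowLoop (w i : Nat) (m : List (List Int)) : List (List Int) :=
  (List.range w).foldl (fun r k => r.modify i (fun row => row.set k 1)) m

-- `for k in range(l_rows): res[k][j] = 1`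
def pvColLoop (n j : Nat) (m : List (List Int)) : List (List Int) :=
  (List.range n).foldl (fun r k => r.modify k (fun row => row.set j 1)) m

-- the body of `for pair in pairs:`
def pvApply (w n : Nat) (m : List (List Int)) (p : Nat × Nat) : List (List Int) :=
  pvColLoop n p.2 (pvRowLoop w p.1 m)

def boolean_matrix (mat : List (List Int)) : List (List Int) :=
  -- res = mat.copy() (shallow: value-wise res = mat)
  let l_rows := mat.length
  let l_cols := (mat.getD 0 []).length  -- len(mat[0]); mat ≠ [] under Pre_, so getD is exact
  let pairs : List (Nat × Nat) :=
    (List.range l_rows).foldl (fun ps i =>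
      (List.range l_cols).foldl (fun ps j =>
        -- mat[i][j] == 1 ; both reads in range under Pre_, so getD is exact
        if (mat.getD i []).getD j 0 == 1 then ps ++ [(i, j)] else ps) ps) []
  pairs.foldl (pvApply l_cols l_rows) mat

-- ===== PORT B =====
-- helper for the `for j in cols: filled[j] = 1` loop on a copied row
-- (`filled[j] = 1` is in range under Pre_: every marked column index is a valid column)
def pvFill (r : List Int) (cols : PySem.Set Int) : List Int :=
  cols.foldl (fun row j => PySem.List.pySetD row j 1) r

def boolean_matrix_alt (mat : List (List Int)) : List (List Int) :=
  let marked : PySem.Set Int := PySem.Set.ofList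
    ((PySem.List.enumerate mat).filterMap (fun ir =>
      if ir.2.contains 1 then some ir.1 else none))
  let cols : PySem.Set Int := PySem.Set.ofList
    (marked.flatMap (fun i =>
      (PySem.List.enumerate (PySem.List.pyGetD mat i [])).filterMap (fun jx =>
        if jx.2 == 1 then some jx.1 else none)))
  (PySem.List.enumerate mat).map (fun ir =>
    if ir.1 ∈ marked then List.replicate ir.2.length 1 else pvFill ir.2 cols)

-- ===== PRECONDITION & SPEC =====
-- Pre_ restricts to the function's natural domain, non-empty rectangular matrices: A raises
-- IndexError on the empty matrix (mat[0]) and on ragged inputs with a row shorter than row 0,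
-- and on ragged inputs with rows longer than row 0 A's partial scan/fill up to len(mat[0])
-- is an accident of its implementation.
def Pre_boolean_matrix (mat : List (List Int)) : Prop :=
  mat ≠ [] ∧ ∀ r ∈ mat, r.length = (mat.getD 0 []).length
instance (mat : List (List Int)) : Decidable (Pre_boolean_matrix mat) := by
  unfold Pre_boolean_matrix; infer_instance

def pvWitness_boolean_matrix : List (List Int) := [[1, 0, 0], [0, 0, 0], [0, 0, 1]]

def Spec_boolean_matrix (mat : List (List Int)) (out : List (List Int)) : Prop := out = boolean_matrix_alt mat
instance (mat : List (List Int)) (out : List (List Int)) : Decidable (Spec_boolean_matrix mat out) := by unfold Spec_boolean_matrix; infer_instance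

-- ===== CLAIM (what is proved, stated in full; the proofs are below) =====
def Claim_equal_boolean_matrix : Prop := ∀ (mat : List (List Int)), Dom_boolean_matrix mat → Pre_boolean_matrix mat → Spec_boolean_matrix mat (boolean_matrix mat)

-- ===== LEMMAS AND PROOFS =====

-- cell (i,k) of a matrix, as an Option
def pvCell (m : List (List Int)) (i k : Nat) : Option Int := m[i]?.bind (fun r => r[k]?)

-- cell read the way A's scan reads it (getD-based, exact in range)
def pvM (mat : List (List Int)) (i j : Nat) : Int := (mat.getD i []).getD j 0

-- effect of the row loop on a single row: the first w entries become 1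
def pvSetTo (w : Nat) (row : List Int) : List Int :=
  (List.range w).foldl (fun r k => r.set k 1) row

-- A's `pairs` list, named for the proofs (definitionally what the port builds)
def pvPairs (mat : List (List Int)) : List (Nat × Nat) :=
  (List.range mat.length).foldl (fun ps i =>
    (List.range (mat.getD 0 []).length).foldl (fun ps j =>
      if (mat.getD i []).getD j 0 == 1 then ps ++ [(i, j)] else ps) ps) []

-- B's marked-row / marked-column lists, named for the proofs
def pvRowsL (mat : List (List Int)) : List Int :=
  (PySem.List.enumerate mat).filterMap (fun ir =>
    if ir.2.contains 1 then some ir.1 else none)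

def pvColsL (mat : List (List Int)) : List Int :=
  (PySem.Set.ofList (pvRowsL mat)).flatMap (fun i =>
    (PySem.List.enumerate (PySem.List.pyGetD mat i [])).filterMap (fun jx =>
      if jx.2 == 1 then some jx.1 else none))

theorem pv_length_setTo (w : Nat) (row : List Int) : (pvSetTo w row).length = row.length := by
  unfold pvSetTo
  induction w with
  | zero => rfl
  | succ w ih => simp [List.range_succ, List.foldl_append, ih]

theorem pv_getElem?_setTo (w : Nat) (row : List Int) (k : Nat) :
    (pvSetTo w row)[k]? = if k < w ∧ k < row.length then some 1 else row[k]? := by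
  induction w with
  | zero => simp [pvSetTo]
  | succ w ih =>
      have h : pvSetTo (w + 1) row = (pvSetTo w row).set w 1 := by
        simp [pvSetTo, List.range_succ, List.foldl_append]
      rw [h, List.getElem?_set, pv_length_setTo, ih]
      split_ifs <;> first
        | rfl
        | omega
        | (exact (List.getElem?_eq_none (by omega)).symm)

theorem pv_getElem?_rowLoop (w i : Nat) (m : List (List Int)) (i' : Nat) :
    (pvRowLoop w i m)[i']? = if i' = i then (m[i]?).map (pvSetTo w) else m[i']? := by
  induction w with
  | zero =>
      have h0 : (m[i]?).map (pvSetTo 0) = m[i]? := by cases m[i]? <;> rfl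
      simp only [pvRowLoop, List.range_zero, List.foldl_nil]
      rw [h0]
      split_ifs with hii
      · rw [hii]
      · rfl
  | succ w ih =>
      have h : pvRowLoop (w + 1) i m = (pvRowLoop w i m).modify i (fun row => row.set w 1) := by
        simp [pvRowLoop, List.range_succ, List.foldl_append]
      rw [h, List.getElem?_modify, ih]
      by_cases hii : i' = i
      · rw [if_pos hii, if_pos hii]
        have hs : ∀ row : List Int, (pvSetTo w row).set w 1 = pvSetTo (w + 1) row := by
          intro row; simp [pvSetTo, List.range_succ, List.foldl_append]
        cases m[i]? <;> simp [hii, hs]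
      · rw [if_neg hii, if_neg hii]
        cases m[i']? <;> simp [Ne.symm hii]

theorem pv_getElem?_colLoop (n j : Nat) (m : List (List Int)) (i : Nat) :
    (pvColLoop n j m)[i]? = if i < n then (m[i]?).map (fun row => row.set j 1) else m[i]? := by
  induction n with
  | zero => simp [pvColLoop]
  | succ n ih =>
      have h : pvColLoop (n + 1) j m = (pvColLoop n j m).modify n (fun row => row.set j 1) := by
        simp [pvColLoop, List.range_succ, List.foldl_append]
      rw [h, List.getElem?_modify, ih]
      by_cases hin : i = n
      · subst hin
        rw [if_neg (Nat.lt_irrefl i), if_pos (Nat.lt_succ_self i)]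
        cases m[i]? <;> simp
      · by_cases hlt : i < n
        · rw [if_pos hlt, if_pos (Nat.lt_succ_of_lt hlt)]
          cases m[i]? <;> simp [Ne.symm hin]
        · rw [if_neg hlt, if_neg (by omega : ¬ i < n + 1)]
          cases m[i]? <;> simp [Ne.symm hin]

theorem pv_length_apply (w n : Nat) (m : List (List Int)) (p : Nat × Nat) :
    (pvApply w n m p).length = m.length := by
  have h1 : ∀ (l : List Nat) (g : Nat → Nat) (f : Nat → List Int → List Int)
      (m : List (List Int)),
      (l.foldl (fun r k => r.modify (g k) (f k)) m).length = m.length := by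
    intro l g f m
    induction l generalizing m with
    | nil => rfl
    | cons a l ih => simp [List.foldl, ih, List.length_modify]
  unfold pvApply pvColLoop pvRowLoop
  rw [h1 (List.range n) (fun k => k) (fun _ row => row.set p.2 1),
      h1 (List.range w) (fun _ => p.1) (fun k row => row.set k 1)]

theorem pv_rowlen_apply (w n : Nat) (m : List (List Int)) (p : Nat × Nat) (i : Nat) :
    ((pvApply w n m p)[i]?).map List.length = (m[i]?).map List.length := by
  unfold pvApply
  rw [pv_getElem?_colLoop, pv_getElem?_rowLoop]
  by_cases hi : i < n
  · rw [if_pos hi]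
    by_cases hip : i = p.1
    · subst hip
      rw [if_pos rfl]
      cases h : m[p.1]? <;> simp [pv_length_setTo]
    · rw [if_neg hip]
      cases m[i]? <;> simp
  · rw [if_neg hi]
    by_cases hip : i = p.1
    · subst hip
      rw [if_pos rfl]
      cases h : m[p.1]? <;> simp [pv_length_setTo]
    · rw [if_neg hip]

theorem pv_cell_apply (w n : Nat) (m : List (List Int)) (p : Nat × Nat)
    (hn : m.length = n) (hw : ∀ (i : Nat) (hi : i < m.length), w ≤ m[i].length)
    (h1 : p.1 < n) (h2 : p.2 < w) (i k : Nat) :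
    pvCell (pvApply w n m p) i k =
      if i < n ∧ ((i = p.1 ∧ k < w) ∨ k = p.2) then some 1 else pvCell m i k := by
  unfold pvCell pvApply
  rw [pv_getElem?_colLoop, pv_getElem?_rowLoop]
  by_cases hi : i < n
  · have him : i < m.length := by omega
    have hrow : m[i]? = some m[i] := List.getElem?_eq_getElem him
    have hwl : w ≤ m[i].length := hw i him
    rw [if_pos hi]
    by_cases hip : i = p.1
    · have hrowp : m[p.1]? = some m[i] := by rw [← hip]; exact hrow
      rw [if_pos hip, hrowp, hrow]
      simp only [Option.map_some, Option.bind_some]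
      rw [List.getElem?_set, pv_length_setTo, pv_getElem?_setTo]
      split_ifs <;> first
        | rfl
        | omega
    · rw [if_neg hip, hrow]
      simp only [Option.map_some, Option.bind_some]
      rw [List.getElem?_set]
      split_ifs <;> first
        | rfl
        | omega
  · have hip : ¬ i = p.1 := by omega
    rw [if_neg hi, if_neg hip,
        if_neg (by omega : ¬ (i < n ∧ ((i = p.1 ∧ k < w) ∨ k = p.2)))]

theorem pv_cell_foldPairs (w n : Nat) (ps : List (Nat × Nat)) (m : List (List Int))
    (hn : m.length = n) (hw : ∀ (i : Nat) (hi : i < m.length), w ≤ m[i].length)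
    (hps : ∀ p ∈ ps, p.1 < n ∧ p.2 < w) (i k : Nat) :
    pvCell (ps.foldl (pvApply w n) m) i k =
      if i < n ∧ ∃ p ∈ ps, (i = p.1 ∧ k < w) ∨ k = p.2 then some 1 else pvCell m i k := by
  induction ps generalizing m with
  | nil => simp
  | cons p ps ih =>
      have hp := hps p (List.mem_cons_self)
      have hn' : (pvApply w n m p).length = n := by rw [pv_length_apply, hn]
      have hw' : ∀ (i' : Nat) (hi' : i' < (pvApply w n m p).length),
          w ≤ (pvApply w n m p)[i'].length := by
        intro i' hi'
        have hsh := pv_rowlen_apply w n m p i'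
        have hi'm : i' < m.length := by rw [pv_length_apply] at hi'; exact hi'
        rw [List.getElem?_eq_getElem hi', List.getElem?_eq_getElem hi'm] at hsh
        simp only [Option.map_some, Option.some.injEq] at hsh
        rw [hsh]; exact hw i' hi'm
      rw [List.foldl_cons, ih (pvApply w n m p) hn' hw'
            (fun q hq => hps q (List.mem_cons_of_mem p hq)),
          pv_cell_apply w n m p hn hw hp.1 hp.2]
      by_cases hi : i < n
      · by_cases hA : ∃ q ∈ ps, (i = q.1 ∧ k < w) ∨ k = q.2
        · have hC : ∃ q ∈ p :: ps, (i = q.1 ∧ k < w) ∨ k = q.2 := by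
            obtain ⟨q, hq, hqc⟩ := hA
            exact ⟨q, List.mem_cons_of_mem p hq, hqc⟩
          simp [hi, hA]
        · by_cases hB : (i = p.1 ∧ k < w) ∨ k = p.2
          · have hC : ∃ q ∈ p :: ps, (i = q.1 ∧ k < w) ∨ k = q.2 :=
              ⟨p, List.mem_cons_self, hB⟩
            simp [hi, hA, hB]
          · have hC : ¬ ∃ q ∈ p :: ps, (i = q.1 ∧ k < w) ∨ k = q.2 := by
              rintro ⟨q, hq, hqc⟩
              rcases List.mem_cons.mp hq with rfl | hq'
              · exact hB hqc
              · exact hA ⟨q, hq', hqc⟩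
            simp [hi, hA, hB]
      · simp [hi]

theorem pv_pairs_mem (mat : List (List Int)) (q : Nat × Nat) :
    q ∈ pvPairs mat ↔
      q.1 < mat.length ∧ q.2 < (mat.getD 0 []).length ∧ pvM mat q.1 q.2 = 1 := by
  unfold pvPairs
  simp only [PySem.List.foldl_append_if, PySem.List.foldl_append_eq_flatMap]
  simp only [List.nil_append, List.mem_flatMap, List.mem_map, List.mem_filter,
    List.mem_range, beq_iff_eq]
  constructor
  · rintro ⟨i, hi, j, ⟨hjw, hj1⟩, rfl⟩
    exact ⟨hi, hjw, hj1⟩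
  · rintro ⟨h1, h2, h3⟩
    exact ⟨q.1, h1, q.2, ⟨h2, h3⟩, rfl⟩

theorem pv_length_foldPairs (w n : Nat) (ps : List (Nat × Nat)) (m : List (List Int)) :
    (ps.foldl (pvApply w n) m).length = m.length := by
  induction ps generalizing m with
  | nil => rfl
  | cons p ps ih => rw [List.foldl_cons, ih, pv_length_apply]

theorem pv_mem_rows (mat : List (List Int)) (i : Nat) :
    ((i : Int) ∈ pvRowsL mat) ↔ ∃ h : i < mat.length, (1 : Int) ∈ mat[i] := by
  unfold pvRowsL
  rw [List.mem_filterMap]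
  constructor
  · rintro ⟨ir, hmem, hf⟩
    rw [PySem.List.mem_enumerate_iff] at hmem
    obtain ⟨c, hc, rfl⟩ := hmem
    simp only at hf
    split_ifs at hf with hcont
    · simp only [Option.some.injEq] at hf
      have hci : c = i := by omega
      subst hci
      exact ⟨hc, List.contains_iff_mem.mp hcont⟩
  · rintro ⟨hi, hmem⟩
    refine ⟨((i : Int), mat[i]), ?_, ?_⟩
    · rw [PySem.List.mem_enumerate_iff]
      exact ⟨i, hi, by simp⟩
    · simp [hmem]

theorem pv_rows_shape (mat : List (List Int)) (x : Int)
    (hx : x ∈ pvRowsL mat) : ∃ c : Nat, x = (c : Int) ∧ c < mat.length := by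
  unfold pvRowsL at hx
  rw [List.mem_filterMap] at hx
  obtain ⟨ir, hmem, hf⟩ := hx
  rw [PySem.List.mem_enumerate_iff] at hmem
  obtain ⟨c, hc, rfl⟩ := hmem
  simp only at hf
  split_ifs at hf with hcont
  simp only [Option.some.injEq] at hf
  exact ⟨c, by omega, hc⟩

theorem pv_mem_cols (mat : List (List Int)) (k : Nat) :
    ((k : Int) ∈ pvColsL mat) ↔
      ∃ i, ∃ h : i < mat.length, k < mat[i].length ∧ mat[i].getD k 0 = 1 := by
  unfold pvColsL
  rw [List.mem_flatMap]
  constructor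
  · rintro ⟨x, hx, hmem⟩
    rw [PySem.Set.mem_ofList] at hx
    obtain ⟨c, rfl, hc⟩ := pv_rows_shape mat x hx
    have hget : PySem.List.pyGetD mat (c : Int) [] = mat[c] := by
      rw [PySem.List.pyGetD_natCast, List.getD_eq_getElem mat [] hc]
    rw [hget, List.mem_filterMap] at hmem
    obtain ⟨jx, hjx, hf⟩ := hmem
    rw [PySem.List.mem_enumerate_iff] at hjx
    obtain ⟨d, hd, rfl⟩ := hjx
    simp only at hf
    split_ifs at hf with h1
    simp only [Option.some.injEq] at hf
    have hdk : d = k := by omega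
    subst hdk
    refine ⟨c, hc, hd, ?_⟩
    rw [List.getD_eq_getElem mat[c] 0 hd]
    exact beq_iff_eq.mp h1
  · rintro ⟨i, hi, hk, h1⟩
    rw [List.getD_eq_getElem mat[i] 0 hk] at h1
    have hrmem : (i : Int) ∈ pvRowsL mat :=
      (pv_mem_rows mat i).mpr ⟨hi, h1 ▸ List.getElem_mem hk⟩
    refine ⟨(i : Int), (PySem.Set.mem_ofList _ _).mpr hrmem, ?_⟩
    have hget : PySem.List.pyGetD mat (i : Int) [] = mat[i] := by
      rw [PySem.List.pyGetD_natCast, List.getD_eq_getElem mat [] hi]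
    rw [hget, List.mem_filterMap]
    refine ⟨((k : Int), mat[i][k]), ?_, ?_⟩
    · rw [PySem.List.mem_enumerate_iff]
      exact ⟨k, hk, by simp⟩
    · simp [h1]

theorem pv_cols_shape (mat : List (List Int)) (x : Int)
    (hx : x ∈ pvColsL mat) :
    ∃ c : Nat, x = (c : Int) ∧ ∃ i, ∃ h : i < mat.length, c < mat[i].length := by
  unfold pvColsL at hx
  rw [List.mem_flatMap] at hx
  obtain ⟨y, hy, hmem⟩ := hx
  rw [PySem.Set.mem_ofList] at hy
  obtain ⟨c, rfl, hc⟩ := pv_rows_shape mat y hy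
  have hget : PySem.List.pyGetD mat (c : Int) [] = mat[c] := by
    rw [PySem.List.pyGetD_natCast, List.getD_eq_getElem mat [] hc]
  rw [hget, List.mem_filterMap] at hmem
  obtain ⟨jx, hjx, hf⟩ := hmem
  rw [PySem.List.mem_enumerate_iff] at hjx
  obtain ⟨d, hd, rfl⟩ := hjx
  simp only at hf
  split_ifs at hf with h1
  simp only [Option.some.injEq] at hf
  exact ⟨d, by omega, c, hc, hd⟩

theorem pv_fill_getElem? (l : List Int) (r : List Int)
    (hl : ∀ j ∈ l, ∃ c : Nat, j = (c : Int) ∧ c < r.length) (k : Nat) :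
    (l.foldl (fun row j => PySem.List.pySetD row j 1) r)[k]? =
      if (k : Int) ∈ l then some 1 else r[k]? := by
  induction l generalizing r with
  | nil => simp
  | cons j l ih =>
      obtain ⟨c, rfl, hc⟩ := hl j List.mem_cons_self
      have hset : PySem.List.pySetD r (c : Int) 1 = r.set c 1 := by
        simp [PySem.List.pySetD, PySem.List.pySet?, PySem.List.pyIdx?, hc]
      rw [List.foldl_cons, hset,
          ih (r.set c 1) (fun j hj => by
            obtain ⟨c', hc', hlt⟩ := hl j (List.mem_cons_of_mem _ hj)
            exact ⟨c', hc', by rw [List.length_set]; exact hlt⟩)]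
      by_cases hkl : (k : Int) ∈ l
      · rw [if_pos hkl, if_pos (List.mem_cons_of_mem _ hkl)]
      · rw [if_neg hkl, List.getElem?_set]
        by_cases hck : c = k
        · subst hck
          rw [if_pos rfl, if_pos hc, if_pos (List.mem_cons_self)]
        · rw [if_neg hck, if_neg (by
            intro h
            rcases List.mem_cons.mp h with h' | h'
            · exact hck (by omega)
            · exact hkl h')]

-- B's result, cell by cell (for rectangular matrices)
theorem pv_cell_alt (mat : List (List Int))
    (hrect : ∀ (i' : Nat) (hi' : i' < mat.length), mat[i'].length = (mat.getD 0 []).length)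
    (i k : Nat) :
    pvCell (boolean_matrix_alt mat) i k =
      if i < mat.length ∧ k < (mat.getD i []).length then
        some (if (i : Int) ∈ pvRowsL mat ∨ (k : Int) ∈ pvColsL mat then 1
              else (mat.getD i []).getD k 0)
      else none := by
  have hB : boolean_matrix_alt mat =
      (PySem.List.enumerate mat).map (fun ir =>
        if ir.1 ∈ PySem.Set.ofList (pvRowsL mat) then List.replicate ir.2.length 1
        else pvFill ir.2 (PySem.Set.ofList (pvColsL mat))) := rfl
  unfold pvCell
  by_cases hi : i < mat.length
  · have hrow : mat[i]? = some mat[i] := List.getElem?_eq_getElem hi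
    have hgd : mat.getD i [] = mat[i] := List.getD_eq_getElem mat [] hi
    have hBi : (boolean_matrix_alt mat)[i]? =
        some (if ((i : Int)) ∈ PySem.Set.ofList (pvRowsL mat) then
            List.replicate mat[i].length 1
          else pvFill mat[i] (PySem.Set.ofList (pvColsL mat))) := by
      rw [hB, List.getElem?_map, PySem.List.getElem?_enumerate, hrow]
      simp
    rw [hBi]
    simp only [Option.bind_some]
    by_cases hm : (i : Int) ∈ pvRowsL mat
    · rw [if_pos ((PySem.Set.mem_ofList _ _).mpr hm)]
      by_cases hk : k < mat[i].length
      · rw [List.getElem?_replicate, if_pos hk,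
            if_pos (show i < mat.length ∧ k < (mat.getD i []).length from
              ⟨hi, by rw [hgd]; exact hk⟩),
            if_pos (Or.inl hm)]
      · rw [List.getElem?_eq_none (by rw [List.length_replicate]; omega),
            if_neg (fun h => hk (hgd ▸ h.2))]
    · rw [if_neg (fun h => hm ((PySem.Set.mem_ofList _ _).mp h))]
      unfold pvFill
      have hl : ∀ j ∈ PySem.Set.ofList (pvColsL mat),
          ∃ c : Nat, j = (c : Int) ∧ c < mat[i].length := by
        intro j hj
        obtain ⟨c, rfl, i', hi', hci'⟩ :=
          pv_cols_shape mat j ((PySem.Set.mem_ofList _ _).mp hj)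
        refine ⟨c, rfl, ?_⟩
        rw [hrect i hi, ← hrect i' hi']
        exact hci'
      rw [pv_fill_getElem? (PySem.Set.ofList (pvColsL mat)) mat[i] hl k]
      by_cases hkc : (k : Int) ∈ pvColsL mat
      · have hkw : k < mat[i].length := by
          obtain ⟨c, hc, i', hi', hci'⟩ := pv_cols_shape mat (k : Int) hkc
          have : c = k := by omega
          subst this
          rw [hrect i hi, ← hrect i' hi']
          exact hci'
        rw [if_pos ((PySem.Set.mem_ofList _ _).mpr hkc),
            if_pos (show i < mat.length ∧ k < (mat.getD i []).length from
              ⟨hi, by rw [hgd]; exact hkw⟩),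
            if_pos (Or.inr hkc)]
      · rw [if_neg (fun h => hkc ((PySem.Set.mem_ofList _ _).mp h))]
        by_cases hk : k < mat[i].length
        · rw [if_pos (show i < mat.length ∧ k < (mat.getD i []).length from
              ⟨hi, by rw [hgd]; exact hk⟩),
              if_neg (show ¬ ((i : Int) ∈ pvRowsL mat ∨ (k : Int) ∈ pvColsL mat) by
                rintro (h | h)
                · exact hm h
                · exact hkc h),
              List.getElem?_eq_getElem hk, hgd, List.getD_eq_getElem mat[i] 0 hk]
        · rw [List.getElem?_eq_none (by omega),
              if_neg (fun h => hk (hgd ▸ h.2))]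
  · have hBnone : (boolean_matrix_alt mat)[i]? = none := by
      apply List.getElem?_eq_none
      rw [hB, List.length_map, PySem.List.length_enumerate]
      omega
    rw [hBnone, if_neg (fun h => hi h.1)]
    rfl

-- ===== VERDICT (by name: the statement is the Claim_ definition above) =====
theorem boolean_matrix_spec : Claim_equal_boolean_matrix := by
  intro mat _ hpre
  obtain ⟨hne, hrows⟩ := hpre
  unfold Spec_boolean_matrix
  set w := (mat.getD 0 []).length with hwdef
  have hrect : ∀ (i : Nat) (hi : i < mat.length), mat[i].length = w := by
    intro i hi; exact hrows _ (List.getElem_mem hi)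
  have hw : ∀ (i : Nat) (hi : i < mat.length), w ≤ mat[i].length := by
    intro i hi; rw [hrect i hi]
  have hA : boolean_matrix mat =
      (pvPairs mat).foldl (pvApply w mat.length) mat := rfl
  have hps : ∀ p ∈ pvPairs mat, p.1 < mat.length ∧ p.2 < w := by
    intro p hp
    have h := (pv_pairs_mem mat p).mp hp
    exact ⟨h.1, h.2.1⟩
  have hAlen : (boolean_matrix mat).length = mat.length := by
    rw [hA, pv_length_foldPairs]
  have hBlen : (boolean_matrix_alt mat).length = mat.length := by
    show ((PySem.List.enumerate mat).map _).length = mat.length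
    rw [List.length_map, PySem.List.length_enumerate]
  have hrect' : ∀ (i' : Nat) (hi' : i' < mat.length),
      mat[i'].length = (mat.getD 0 []).length := hrect
  apply List.ext_getElem?
  intro i
  by_cases hi : i < mat.length
  · have hAi : (boolean_matrix mat)[i]? =
        some ((boolean_matrix mat)[i]'(by omega)) := List.getElem?_eq_getElem (by omega)
    have hBi : (boolean_matrix_alt mat)[i]? =
        some ((boolean_matrix_alt mat)[i]'(by omega)) := List.getElem?_eq_getElem (by omega)
    rw [hAi, hBi]
    congr 1
    apply List.ext_getElem?
    intro k
    have e1 : ((boolean_matrix mat)[i]'(by omega))[k]? = pvCell (boolean_matrix mat) i k := by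
      unfold pvCell; rw [hAi]; rfl
    have e2 : ((boolean_matrix_alt mat)[i]'(by omega))[k]? =
        pvCell (boolean_matrix_alt mat) i k := by
      unfold pvCell; rw [hBi]; rfl
    rw [e1, e2, hA,
        pv_cell_foldPairs w mat.length (pvPairs mat) mat rfl hw hps i k,
        pv_cell_alt mat hrect' i k]
    have hgd : mat.getD i [] = mat[i] := List.getD_eq_getElem mat [] hi
    by_cases hk : k < mat[i].length
    · have hBc : i < mat.length ∧ k < (mat.getD i []).length := ⟨hi, by rw [hgd]; exact hk⟩
      rw [if_pos hBc]
      have hkw : k < w := by rw [hrect i hi] at hk; exact hk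
      by_cases hc : (i : Int) ∈ pvRowsL mat ∨ (k : Int) ∈ pvColsL mat
      · have hAc : i < mat.length ∧ ∃ p ∈ pvPairs mat, (i = p.1 ∧ k < w) ∨ k = p.2 := by
          refine ⟨hi, ?_⟩
          rcases hc with hr | hcm
          · obtain ⟨_, hmem⟩ := (pv_mem_rows mat i).mp hr
            obtain ⟨j, hj, hj1⟩ := List.mem_iff_getElem.mp hmem
            have hjw : j < w := by rw [hrect i hi] at hj; exact hj
            refine ⟨(i, j), (pv_pairs_mem mat (i, j)).mpr ⟨hi, hjw, ?_⟩, Or.inl ⟨rfl, hkw⟩⟩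
            unfold pvM
            rw [hgd, List.getD_eq_getElem mat[i] 0 hj, hj1]
          · obtain ⟨i', hi', hk', h1⟩ := (pv_mem_cols mat k).mp hcm
            refine ⟨(i', k), (pv_pairs_mem mat (i', k)).mpr ⟨hi', hkw, ?_⟩, Or.inr rfl⟩
            unfold pvM; rw [List.getD_eq_getElem mat [] hi']; exact h1
        rw [if_pos hAc, if_pos hc]
      · have hnAc : ¬ (i < mat.length ∧ ∃ p ∈ pvPairs mat, (i = p.1 ∧ k < w) ∨ k = p.2) := by
          rintro ⟨_, p, hp, hcase⟩
          obtain ⟨hp1, hp2, hpM⟩ := (pv_pairs_mem mat p).mp hp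
          rcases hcase with ⟨hip, _⟩ | hkp
          · refine hc (Or.inl ((pv_mem_rows mat i).mpr ⟨hi, ?_⟩))
            have hjr : p.2 < mat[i].length := by rw [hrect i hi]; exact hp2
            have hv : mat[i].getD p.2 0 = 1 := by
              unfold pvM at hpM; rw [← hip, hgd] at hpM; exact hpM
            rw [List.getD_eq_getElem mat[i] 0 hjr] at hv
            exact hv ▸ List.getElem_mem hjr
          · refine hc (Or.inr ((pv_mem_cols mat k).mpr ⟨p.1, hp1, ?_, ?_⟩))
            · rw [hrect p.1 hp1]; omega
            · rw [hkp]
              unfold pvM at hpM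
              rw [List.getD_eq_getElem mat [] hp1] at hpM
              exact hpM
        rw [if_neg hnAc, if_neg hc]
        unfold pvCell
        rw [List.getElem?_eq_getElem hi]
        simp only [Option.bind_some]
        rw [List.getElem?_eq_getElem hk, hgd, List.getD_eq_getElem mat[i] 0 hk]
    · have hnBc : ¬ (i < mat.length ∧ k < (mat.getD i []).length) :=
        fun h => hk (hgd ▸ h.2)
      rw [if_neg hnBc]
      have hkw : ¬ k < w := by rw [hrect i hi] at hk; exact hk
      have hnAc : ¬ (i < mat.length ∧ ∃ p ∈ pvPairs mat, (i = p.1 ∧ k < w) ∨ k = p.2) := by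
        rintro ⟨_, p, hp, hcase⟩
        obtain ⟨hp1, hp2, _⟩ := (pv_pairs_mem mat p).mp hp
        rcases hcase with ⟨_, hkw'⟩ | hkp
        · exact hkw hkw'
        · exact hkw (by omega)
      rw [if_neg hnAc]
      unfold pvCell
      rw [List.getElem?_eq_getElem hi]
      simp only [Option.bind_some]
      rw [List.getElem?_eq_none (by omega)]
  · rw [List.getElem?_eq_none (by omega), List.getElem?_eq_none (by omega)]
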